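-- pv_equiv track=rewrite | github.com/fkutzner/PyCSCL | cscl_tests/cscl/unit/test_cardinality_constraint_encoders.py | select_items_by_bits
-- ===== SOURCE A (Python) =====
-- def select_items_by_bits(lst, i):
--     """
--     Selects items from lst indexed by the bits in i.
--
--     :param lst: A list.
--     :param i: A non-negative integer whose most significant bit is at a position lesser than len(lst).
--     :return: A list containing all lst[k] where (i & (1 << k)) == 1.
--     """
--
--     result = []
--     counter = 0
--     while i > 0:
--         if i & 1 != 0:
--             result.append(lst[counter])
--         i = i >> 1
--         counter += 1
--
--     return result
-- ===== SOURCE B (Python) =====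
-- def select_items_by_bits(lst, i):
--     # Iterates once per SET bit (highest first), subtracting each bit off the
--     # mask, then reverses; A shifts through every bit position with a counter.
--     result = []
--     while i > 0:
--         k = i.bit_length() - 1
--         result.append(lst[k])
--         i -= 1 << k
--     result.reverse()
--     return result
-- ===== Notes on version B (the rewrite author's own statement) =====
-- stated objective: alternative
-- what changed: B walks only the set bits of i from the highest down via bit_length, subtracting each bit off the mask and building the result back-to-front (reversed at the end), instead of A's shift-and-counter scan over every bit position.
import Mathlib
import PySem

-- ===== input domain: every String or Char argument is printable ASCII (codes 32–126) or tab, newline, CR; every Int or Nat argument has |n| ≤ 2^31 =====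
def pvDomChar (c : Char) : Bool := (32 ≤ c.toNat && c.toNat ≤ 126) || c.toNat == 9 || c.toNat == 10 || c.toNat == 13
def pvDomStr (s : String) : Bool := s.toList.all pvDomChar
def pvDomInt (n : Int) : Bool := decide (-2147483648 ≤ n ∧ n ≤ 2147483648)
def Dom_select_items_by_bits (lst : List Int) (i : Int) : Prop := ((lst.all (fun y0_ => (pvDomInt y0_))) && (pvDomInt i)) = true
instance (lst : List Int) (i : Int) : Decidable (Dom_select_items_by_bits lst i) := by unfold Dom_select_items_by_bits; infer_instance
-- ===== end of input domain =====

-- B walks only the set bits of i, highest first via bit_length, subtracting each bit and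
-- building the result back-to-front; equivalent to A's shift-and-counter scan (return value).


-- ===== PORT A =====
-- A's while-loop as recursion on (i, counter, result); 'i >> 1' is '>>> (1:Nat)',
-- 'i & 1' is PySem.Int.band, 'lst[counter]' is pyGetD (in range under Pre_).
def selA_loop (lst : List Int) (i : Int) (counter : Int) (result : List Int) : List Int :=
  if _h : i > 0 then
    selA_loop lst (i >>> (1 : Nat)) (counter + 1)
      (if PySem.Int.band i 1 ≠ 0 then result ++ [PySem.List.pyGetD lst counter 0] else result)
  else result
termination_by i.toNat
decreasing_by
  have hi : i = ((i.toNat : Nat) : Int) := by omega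
  have hr : ((i.toNat : Nat) : Int) >>> (1 : Nat) = ((i.toNat / 2 : Nat) : Int) := rfl
  rw [hi, hr]
  simp only [Int.toNat_natCast]
  omega

def select_items_by_bits (lst : List Int) (i : Int) : List Int :=
  selA_loop lst i 0 []

-- ===== PORT B =====
-- B's while-loop: k = i.bit_length() - 1 (PySem.Int.bitLength), append lst[k],
-- i -= 1 << k ('<<<'); result reversed at the end.
def selB_loop (lst : List Int) (i : Int) (result : List Int) : List Int :=
  if _h : i > 0 then
    let k := PySem.Int.bitLength i - 1
    selB_loop lst (i - ((1 : Int) <<< k)) (result ++ [PySem.List.pyGetD lst (k : Int) 0])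
  else result
termination_by i.toNat
decreasing_by
  have h1 : ((1 : Int) <<< (PySem.Int.bitLength i - 1)) = (((1 <<< (PySem.Int.bitLength i - 1) : Nat)) : Int) := rfl
  have h2 : (1 : Nat) ≤ 1 <<< (PySem.Int.bitLength i - 1) := Nat.one_le_two_pow.trans_eq (Nat.one_shiftLeft _).symm
  omega

def select_items_by_bits_alt (lst : List Int) (i : Int) : List Int :=
  (selB_loop lst i []).reverse

-- ===== PRECONDITION & SPEC =====
-- The Python A raises IndexError (lst[counter] past the end of lst) exactly when i ≥ 2^len(lst);
-- those inputs are excluded (Python B raises there too). All i < 2^len(lst), including i ≤ 0, are admitted.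
def Pre_select_items_by_bits (lst : List Int) (i : Int) : Prop := i < 2 ^ lst.length
instance (lst : List Int) (i : Int) : Decidable (Pre_select_items_by_bits lst i) := by
  unfold Pre_select_items_by_bits; infer_instance
def pvWitness_select_items_by_bits : List Int × Int := ([3, -5, 7], 5)

def Spec_select_items_by_bits (lst : List Int) (i : Int) (out : List Int) : Prop := out = select_items_by_bits_alt lst i
instance (lst : List Int) (i : Int) (out : List Int) : Decidable (Spec_select_items_by_bits lst i out) := by unfold Spec_select_items_by_bits; infer_instance

-- ===== CLAIM (what is proved, stated in full; the proofs are below) =====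
def Claim_equal_select_items_by_bits : Prop := ∀ (lst : List Int) (i : Int), Dom_select_items_by_bits lst i → Pre_select_items_by_bits lst i → Spec_select_items_by_bits lst i (select_items_by_bits lst i)

-- ===== LEMMAS AND PROOFS =====

-- indices of the set bits of n, in increasing order
def bitIdx : Nat → List Nat
  | 0 => []
  | (n + 1) =>
    (if (n + 1) % 2 = 1 then [0] else []) ++ (bitIdx ((n + 1) / 2)).map (· + 1)
decreasing_by omega

theorem bitIdx_zero : bitIdx 0 = [] := by simp [bitIdx]

theorem bitIdx_eq (n : Nat) :
    bitIdx n = (if n % 2 = 1 then [0] else []) ++ (bitIdx (n / 2)).map (· + 1) := by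
  cases n with
  | zero => simp [bitIdx]
  | succ m => rw [bitIdx]

theorem shiftRight_one_natCast (n : Nat) : ((n : Int) >>> (1 : Nat)) = ((n / 2 : Nat) : Int) := rfl

theorem band_one_natCast (n : Nat) : PySem.Int.band (n : Int) 1 = ((n &&& 1 : Nat) : Int) := rfl

theorem selA_char (n : Nat) : ∀ (lst : List Int) (c : Int) (acc : List Int),
    selA_loop lst (n : Int) c acc
      = acc ++ (bitIdx n).map (fun (k : Nat) => PySem.List.pyGetD lst (c + (k : Int)) 0) := by
  induction n using Nat.strong_induction_on with
  | _ n ih =>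
    intro lst c acc
    rcases Nat.eq_zero_or_pos n with hn | hn
    · subst hn
      rw [selA_loop]
      simp [bitIdx_zero]
    · rw [selA_loop]
      have hpos : ((n : Int) > 0) := by exact_mod_cast hn
      rw [dif_pos hpos, shiftRight_one_natCast, band_one_natCast,
        ih (n / 2) (Nat.div_lt_self hn one_lt_two)]
      rw [bitIdx_eq n, List.map_append, List.map_map]
      have hfun : ((fun k : Nat => PySem.List.pyGetD lst (c + (k : Int)) 0) ∘ (· + 1))
          = (fun k : Nat => PySem.List.pyGetD lst (c + 1 + (k : Int)) 0) := by
        funext k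
        simp only [Function.comp_apply]
        congr 1
        push_cast
        ring
      rw [hfun]
      rcases Nat.mod_two_eq_zero_or_one n with hpar | hpar
      · have hb : ((n &&& 1 : Nat) : Int) = 0 := by
          rw [Nat.and_one_is_mod, hpar]; rfl
        simp [hpar]
      · have hb : ((n &&& 1 : Nat) : Int) ≠ 0 := by
          rw [Nat.and_one_is_mod, hpar]; decide
        simp [hpar]

theorem bitIdx_top (k : Nat) : ∀ n : Nat, 2 ^ k ≤ n → n < 2 ^ (k + 1) →
    bitIdx n = bitIdx (n - 2 ^ k) ++ [k] := by
  induction k with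
  | zero =>
    intro n h1 h2
    have : n = 1 := by omega
    subst this
    rw [bitIdx_eq 1]
    simp [bitIdx_zero]
  | succ k ih =>
    intro n h1 h2
    have e1 : (2 : Nat) ^ (k + 1) = 2 * 2 ^ k := by ring
    have e2 : (2 : Nat) ^ (k + 2) = 4 * 2 ^ k := by ring
    have hp : 0 < (2 : Nat) ^ k := Nat.two_pow_pos k
    have hd1 : 2 ^ k ≤ n / 2 := by omega
    have hd2 : n / 2 < 2 ^ (k + 1) := by omega
    have hm2 : (n - 2 ^ (k + 1)) % 2 = n % 2 := by omega
    have hd : (n - 2 ^ (k + 1)) / 2 = n / 2 - 2 ^ k := by omega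
    rw [bitIdx_eq n, bitIdx_eq (n - 2 ^ (k + 1)), hm2, hd, ih (n / 2) hd1 hd2]
    simp

theorem bitLength_natCast_pos (n : Nat) (hn : 0 < n) :
    2 ^ (PySem.Int.bitLength (n : Int) - 1) ≤ n ∧
      n < 2 ^ (PySem.Int.bitLength (n : Int) - 1 + 1) := by
  have h1 := PySem.Int.two_pow_bitLength_le (n : Int) (by exact_mod_cast hn.ne')
  have h2 := PySem.Int.lt_two_pow_bitLength (n : Int)
  rw [Int.natAbs_natCast] at h1 h2
  have hL : 1 ≤ PySem.Int.bitLength (n : Int) := by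
    by_contra h
    have : PySem.Int.bitLength (n : Int) = 0 := by omega
    rw [this] at h2
    omega
  refine ⟨h1, ?_⟩
  have : PySem.Int.bitLength (n : Int) - 1 + 1 = PySem.Int.bitLength (n : Int) := by omega
  rw [this]; exact h2

theorem selB_char (n : Nat) : ∀ (lst : List Int) (acc : List Int),
    selB_loop lst (n : Int) acc
      = acc ++ ((bitIdx n).map (fun (k : Nat) => PySem.List.pyGetD lst (k : Int) 0)).reverse := by
  induction n using Nat.strong_induction_on with
  | _ n ih =>
    intro lst acc
    rcases Nat.eq_zero_or_pos n with hn | hn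
    · subst hn
      rw [selB_loop]
      simp [bitIdx_zero]
    · have hpos : ((n : Int) > 0) := by exact_mod_cast hn
      obtain ⟨h1, h2⟩ := bitLength_natCast_pos n hn
      rw [selB_loop, dif_pos hpos]
      show selB_loop lst ((n : Int) - (1 : Int) <<< (PySem.Int.bitLength (n : Int) - 1))
          (acc ++ [PySem.List.pyGetD lst ((PySem.Int.bitLength (n : Int) - 1 : Nat) : Int) 0]) = _
      generalize PySem.Int.bitLength (n : Int) - 1 = k at h1 h2 ⊢
      have hsh : ((1 : Int) <<< k) = ((2 ^ k : Nat) : Int) := by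
        have : ((1 : Int) <<< k) = (((1 <<< k : Nat)) : Int) := rfl
        rw [this, Nat.one_shiftLeft]
      have hsub : (n : Int) - ((1 : Int) <<< k) = ((n - 2 ^ k : Nat) : Int) := by
        rw [hsh]; omega
      have hlt : n - 2 ^ k < n := by
        have hp : 0 < (2 : Nat) ^ k := Nat.two_pow_pos k
        omega
      rw [hsub, ih (n - 2 ^ k) hlt, bitIdx_top k n h1 h2]
      simp

-- ===== VERDICT (by name: the statement is the Claim_ definition above) =====
theorem select_items_by_bits_spec : Claim_equal_select_items_by_bits := by
  unfold Claim_equal_select_items_by_bits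
  intro lst i _ _
  unfold Spec_select_items_by_bits select_items_by_bits select_items_by_bits_alt
  by_cases h : i ≤ 0
  · rw [selA_loop, selB_loop]
    simp [not_lt.mpr h]
  · have hi : i = ((i.toNat : Nat) : Int) := by omega
    rw [hi, selA_char, selB_char]
    simp
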